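-- pv_equiv track=rewrite | github.com/SudheerBabuGitHub/AOC2019 | Day24.py | calcbiodiversity
-- ===== SOURCE A (Python) =====
-- def calcbiodiversity(grid):
--     power=0
--     biodiversity = 0
--     for i,row in enumerate(grid):
--         for j,col in enumerate(row):
--             if(grid[i][j]==1):
--                 biodiversity = biodiversity+pow(2,power)
--             power = power+1
--     return biodiversity
-- ===== SOURCE B (Python) =====
-- def calcbiodiversity(grid):
--     cells = [c for row in grid for c in row]
--     biodiversity = 0
--     for cell in reversed(cells):
--         biodiversity = biodiversity * 2 + (1 if cell == 1 else 0)
--     return biodiversity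
-- ===== Notes on version B (the rewrite author's own statement) =====
-- stated objective: simpler
-- what changed: Replaces the power counter and pow(2,power) per cell by flattening the grid and applying Horner's method (iterative doubling) over the cells in reverse order.
import Mathlib
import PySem

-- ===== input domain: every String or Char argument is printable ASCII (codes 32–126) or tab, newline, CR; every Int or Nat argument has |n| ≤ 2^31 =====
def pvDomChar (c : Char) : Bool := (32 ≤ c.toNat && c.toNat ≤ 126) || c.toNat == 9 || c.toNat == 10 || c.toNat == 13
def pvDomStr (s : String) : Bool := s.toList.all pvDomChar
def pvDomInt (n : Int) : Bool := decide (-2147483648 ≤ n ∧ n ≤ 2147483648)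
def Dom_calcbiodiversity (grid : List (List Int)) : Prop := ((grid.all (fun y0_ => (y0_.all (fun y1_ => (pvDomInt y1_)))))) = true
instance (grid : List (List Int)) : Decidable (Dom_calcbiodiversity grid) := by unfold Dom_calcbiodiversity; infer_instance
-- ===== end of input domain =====

-- B: Horners method over the flattened cells in reverse, instead of a power counter with pow(2,power).

-- ===== PORT A =====
def calcbiodiversity (grid : List (List Int)) : Int :=
  (grid.foldl (fun (s : Nat × Int) row =>
      row.foldl (fun (t : Nat × Int) col =>
        (t.1 + 1, if col == 1 then t.2 + (2:Int) ^ t.1 else t.2)) s)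
    ((0 : Nat), (0 : Int))).2

-- ===== PORT B =====
def calcbiodiversity_alt (grid : List (List Int)) : Int :=
  grid.flatten.reverse.foldl (fun acc c => acc * 2 + (if c == 1 then 1 else 0)) 0

-- ===== PRECONDITION & SPEC =====
def Spec_calcbiodiversity (grid : List (List Int)) (out : Int) : Prop := out = calcbiodiversity_alt grid
instance (grid : List (List Int)) (out : Int) : Decidable (Spec_calcbiodiversity grid out) := by unfold Spec_calcbiodiversity; infer_instance

-- ===== CLAIM (what is proved, stated in full; the proofs are below) =====
def Claim_equal_calcbiodiversity : Prop := ∀ (grid : List (List Int)), Dom_calcbiodiversity grid → Spec_calcbiodiversity grid (calcbiodiversity grid)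

-- ===== LEMMAS AND PROOFS =====

-- ===== VERDICT (by name: the statement is the Claim_ definition above) =====
-- Horner value of a cell list (B read via foldr)
def pvH (cells : List Int) : Int :=
  cells.foldr (fun c acc => acc * 2 + (if c == 1 then 1 else 0)) 0

theorem pv_step_eq (cells : List Int) (p : Nat) (b : Int) :
    cells.foldl (fun (t : Nat × Int) col =>
        (t.1 + 1, if col == 1 then t.2 + (2:Int) ^ t.1 else t.2)) (p, b)
      = (p + cells.length, b + (2:Int) ^ p * pvH cells) := by
  induction cells generalizing p b with
  | nil => simp [pvH]
  | cons c cs ih =>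
    simp only [List.foldl_cons, ih, pvH, List.foldr_cons]
    simp only [Prod.mk.injEq, List.length_cons]
    refine ⟨by omega, ?_⟩
    by_cases h : c == 1 <;> simp [h, pow_succ] <;> ring

theorem calcbiodiversity_spec : Claim_equal_calcbiodiversity := by
  intro grid _
  unfold Spec_calcbiodiversity calcbiodiversity calcbiodiversity_alt
  rw [List.foldl_reverse]
  have : (grid.foldl (fun (s : Nat × Int) row =>
      row.foldl (fun (t : Nat × Int) col =>
        (t.1 + 1, if col == 1 then t.2 + (2:Int) ^ t.1 else t.2)) s)
    ((0 : Nat), (0 : Int)))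
      = grid.flatten.foldl (fun (t : Nat × Int) col =>
        (t.1 + 1, if col == 1 then t.2 + (2:Int) ^ t.1 else t.2)) ((0:Nat), (0:Int)) := by
    rw [List.foldl_flatten]
  rw [this, pv_step_eq]
  simp [pvH]
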